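-- pv_equiv track=rewrite | github.com/BeiBei-Clic/SGB-EF_Rebase | src/utils/txt2Npz.py | remove_gap_tokens
-- ===== SOURCE A (Python) =====
-- def remove_gap_tokens(z_ids: list, gap_token: int = 0, pad_token: int = 4) -> list:
--     """从对齐序列中移除 GAP token，得到未对齐序列.
--
--     保留 BOS token 和有效 token，去掉 GAP token 和末尾的 PAD token.
--     """
--     result = []
--     for token in z_ids:
--         if token == pad_token:
--             break  # 遇到 PAD 就停止（后面全是 padding）
--         if token != gap_token:
--             result.append(token)  # 保留 BOS 和有效 token，跳过 GAP
--     return result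
-- ===== SOURCE B (Python) =====
-- def remove_gap_tokens(z_ids: list, gap_token: int = 0, pad_token: int = 4) -> list:
--     """Right-to-left fold: a pad token resets the accumulator (discarding
--     everything after it); non-gap tokens are appended and the accumulator,
--     which holds the answer back-to-front, is reversed at the end."""
--     acc = []
--     for t in reversed(z_ids):
--         if t == pad_token:
--             acc = []
--         elif t != gap_token:
--             acc.append(t)
--     return acc[::-1]
-- ===== Notes on version B (the rewrite author's own statement) =====
-- stated objective: alternative
-- what changed: Scans the list right-to-left as a fold whose accumulator is reset to [] at every pad token (so everything after the first pad is discarded) and prepends non-gap tokens, instead of a left-to-right scan with an early break.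
import Mathlib
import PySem

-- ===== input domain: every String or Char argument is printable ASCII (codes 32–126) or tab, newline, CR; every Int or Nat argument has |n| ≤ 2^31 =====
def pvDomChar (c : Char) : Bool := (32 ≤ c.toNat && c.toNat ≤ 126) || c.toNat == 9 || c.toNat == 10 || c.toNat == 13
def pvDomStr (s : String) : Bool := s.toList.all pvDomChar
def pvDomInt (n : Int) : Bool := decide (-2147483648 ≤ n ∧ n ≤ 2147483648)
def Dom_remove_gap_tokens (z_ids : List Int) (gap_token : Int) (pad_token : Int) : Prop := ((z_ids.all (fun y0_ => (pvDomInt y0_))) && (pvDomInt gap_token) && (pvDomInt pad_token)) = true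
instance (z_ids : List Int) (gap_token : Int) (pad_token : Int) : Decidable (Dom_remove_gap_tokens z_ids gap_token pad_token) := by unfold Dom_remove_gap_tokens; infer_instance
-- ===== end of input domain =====

-- B replaces A's left-to-right scan with early break by a right-to-left fold whose
-- accumulator is reset at pad tokens; same values, alternative algorithm (no speed claim).

-- ===== PORT A =====
-- literal port of A: loop with break on pad, appending non-gap tokens
def remove_gap_tokens (z_ids : List Int) (gap_token : Int) (pad_token : Int) : List Int :=
  match z_ids with
  | [] => []
  | token :: rest =>
    if token = pad_token then []
    else if token ≠ gap_token then token :: remove_gap_tokens rest gap_token pad_token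
    else remove_gap_tokens rest gap_token pad_token

-- ===== PORT B =====
-- port of B: fold over reversed(z_ids); pad resets acc to [], non-gap tokens are
-- appended; the back-to-front accumulator is reversed at the end
def remove_gap_tokens_alt (z_ids : List Int) (gap_token : Int) (pad_token : Int) : List Int :=
  (z_ids.reverse.foldl
    (fun acc t => if t = pad_token then [] else if t ≠ gap_token then acc ++ [t] else acc)
    []).reverse

-- ===== PRECONDITION & SPEC =====
def Spec_remove_gap_tokens (z_ids : List Int) (gap_token : Int) (pad_token : Int) (out : List Int) : Prop := out = remove_gap_tokens_alt z_ids gap_token pad_token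
instance (z_ids : List Int) (gap_token : Int) (pad_token : Int) (out : List Int) : Decidable (Spec_remove_gap_tokens z_ids gap_token pad_token out) := by unfold Spec_remove_gap_tokens; infer_instance

-- ===== CLAIM =====
def Claim_equal_remove_gap_tokens : Prop := ∀ (z_ids : List Int) (gap_token : Int) (pad_token : Int), Dom_remove_gap_tokens z_ids gap_token pad_token → Spec_remove_gap_tokens z_ids gap_token pad_token (remove_gap_tokens z_ids gap_token pad_token)

-- ===== LEMMAS AND PROOFS =====
theorem foldl_rev_eq (z_ids : List Int) (gap_token pad_token : Int) :
    z_ids.reverse.foldl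
      (fun acc t => if t = pad_token then [] else if t ≠ gap_token then acc ++ [t] else acc)
      []
      = (remove_gap_tokens z_ids gap_token pad_token).reverse := by
  induction z_ids with
  | nil => rfl
  | cons t rest ih =>
    unfold remove_gap_tokens
    simp only [List.reverse_cons, List.foldl_append, List.foldl_cons, List.foldl_nil, ih]
    by_cases hp : t = pad_token
    · simp [hp]
    · by_cases hg : t = gap_token
      · subst hg
        simp only [hp, ite_not]
        split <;> simp
      · simp [hp, hg]

theorem alt_eq (z_ids : List Int) (gap_token pad_token : Int) :
    remove_gap_tokens_alt z_ids gap_token pad_token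
      = remove_gap_tokens z_ids gap_token pad_token := by
  unfold remove_gap_tokens_alt
  rw [foldl_rev_eq, List.reverse_reverse]

-- ===== VERDICT =====
theorem remove_gap_tokens_spec : Claim_equal_remove_gap_tokens := by
  intro z_ids gap_token pad_token _
  unfold Spec_remove_gap_tokens
  rw [alt_eq]
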